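-- pv_equiv track=rewrite | github.com/CLEVER1337/acmp_agent | solutions/689.py | find_best_base
-- ===== SOURCE A (Python) =====
-- def convert(num, base):
--     digits = "0123456789ABCDEFGHIJKLMNOPQRSTUVWXYZ"
--     result = []
--     n = num
--     while n > 0:
--         result.append(digits[n % base])
--         n //= base
--     return ''.join(reversed(result)) if result else "0"
--
-- def calculate_complexity(s):
--     return len(s) + len(set(s))
--
-- def find_best_base(num):
--     best_base = 2
--     best_representation = convert(num, 2)
--     best_complexity = calculate_complexity(best_representation)
--
--     for base in range(3, 37):
--         representation = convert(num, base)
--         complexity = calculate_complexity(representation)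
--
--         if complexity < best_complexity:
--             best_complexity = complexity
--             best_base = base
--             best_representation = representation
--         elif complexity == best_complexity and base < best_base:
--             best_base = base
--             best_representation = representation
--
--     return best_base, best_representation
-- ===== SOURCE B (Python) =====
-- def convert(num, base):
--     if num <= 0:
--         return "0"
--     digits = "0123456789ABCDEFGHIJKLMNOPQRSTUVWXYZ"
--     def go(n):
--         return "" if n == 0 else go(n // base) + digits[n % base]
--     return go(num)
--
-- def find_best_base(num):
--     reps = [(b, convert(num, b)) for b in range(2, 37)]
--     best = min(len(s) + len(set(s)) for _, s in reps)
--     return next((b, s) for b, s in reps if len(s) + len(set(s)) == best)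
-- ===== Notes on version B (the rewrite author's own statement) =====
-- stated objective: alternative
-- what changed: Replaces A's online best-tracking loop (with its dead tie-break branch) by materializing the full table of (base, representation) pairs, computing the minimum complexity with min(), and selecting the first pair attaining it; convert is rewritten as a recursive most-significant-digit-first build instead of append-then-reverse.
import Mathlib
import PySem

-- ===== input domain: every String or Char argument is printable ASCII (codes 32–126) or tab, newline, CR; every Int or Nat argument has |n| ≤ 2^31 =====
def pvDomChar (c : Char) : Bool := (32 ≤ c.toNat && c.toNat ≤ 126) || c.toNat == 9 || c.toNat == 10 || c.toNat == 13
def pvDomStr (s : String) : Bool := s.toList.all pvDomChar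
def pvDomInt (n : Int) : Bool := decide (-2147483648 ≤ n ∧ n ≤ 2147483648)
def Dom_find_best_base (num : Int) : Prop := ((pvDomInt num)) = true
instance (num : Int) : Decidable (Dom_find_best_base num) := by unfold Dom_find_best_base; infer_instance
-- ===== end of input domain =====

-- B materializes the full table of (base, representation) pairs, takes min() of the complexities and the first pair attaining it,
-- with convert rewritten as a most-significant-digit-first recursion; alternative decomposition, same cost.


-- ===== PORT A =====
def pvDigits : String := "0123456789ABCDEFGHIJKLMNOPQRSTUVWXYZ"

-- the 'while n > 0' loop of A's convert; the '2 ≤ base' conjunct only makes the recursion total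
-- (convert is called with bases 2..36 exclusively); digits[n % base] is always in range there, so .getD never fires
def convertLoopA (base n : Int) (acc : List Char) : List Char :=
  if h : 2 ≤ base ∧ 0 < n then
    convertLoopA base (PySem.Int.floordiv n base)
      (acc ++ [(PySem.Str.pyGet? pvDigits (PySem.Int.mod n base)).getD '0'])
  else acc
termination_by n.toNat
decreasing_by
  rw [PySem.Int.floordiv_eq_ediv_of_pos (by omega)]
  have h2 : 0 ≤ n / base := Int.ediv_nonneg (by omega) (by omega)
  have h1 : n / base < n := by
    rw [Int.ediv_lt_iff_lt_mul (by omega)]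
    nlinarith [h.1, h.2]
  omega

def convertA (num base : Int) : String :=
  let result := convertLoopA base num []
  if result = [] then "0" else String.mk result.reverse

def calculate_complexityA (s : String) : Int :=
  PySem.Str.len s + PySem.Set.len (PySem.Set.ofList s.toList)

def stepA (num : Int) (st : Int × String × Int) (base : Int) : Int × String × Int :=
  let representation := convertA num base
  let complexity := calculate_complexityA representation
  if complexity < st.2.2 then (base, representation, complexity)
  else if complexity = st.2.2 ∧ base < st.1 then (base, representation, st.2.2)
  else st

def find_best_base (num : Int) : Int × String :=
  let best_representation := convertA num 2
  let best_complexity := calculate_complexityA best_representation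
  let st := (PySem.List.pyRange 3 37 1).foldl (stepA num) (2, best_representation, best_complexity)
  (st.1, st.2.1)

-- ===== PORT B =====
def pvDigitsB : String := "0123456789ABCDEFGHIJKLMNOPQRSTUVWXYZ"

-- B's inner 'go': builds the digit string most-significant first; '2 ≤ base' again only for totality
def convGoB (base n : Int) : List Char :=
  if h : 2 ≤ base ∧ 0 < n then
    convGoB base (PySem.Int.floordiv n base)
      ++ [(PySem.Str.pyGet? pvDigitsB (PySem.Int.mod n base)).getD '0']
  else []
termination_by n.toNat
decreasing_by
  rw [PySem.Int.floordiv_eq_ediv_of_pos (by omega)]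
  have h2 : 0 ≤ n / base := Int.ediv_nonneg (by omega) (by omega)
  have h1 : n / base < n := by
    rw [Int.ediv_lt_iff_lt_mul (by omega)]
    nlinarith [h.1, h.2]
  omega

def convertB (num base : Int) : String :=
  if num ≤ 0 then "0" else String.mk (convGoB base num)

def find_best_base_alt (num : Int) : Int × String :=
  let reps := (PySem.List.pyRange 2 37 1).map (fun b => (b, convertB num b))
  -- reps is nonempty, so Python's min() cannot raise; .getD never fires
  let best := (PySem.List.min?
      (reps.map (fun p => PySem.Str.len p.2 + PySem.Set.len (PySem.Set.ofList p.2.toList)))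
      (fun x => x)).getD 0
  -- best is attained in reps, so next() cannot raise; .getD never fires
  (reps.find? (fun p =>
      PySem.Str.len p.2 + PySem.Set.len (PySem.Set.ofList p.2.toList) == best)).getD (0, "")

-- ===== PRECONDITION & SPEC =====
def Spec_find_best_base (num : Int) (out : Int × String) : Prop := out = find_best_base_alt num
instance (num : Int) (out : Int × String) : Decidable (Spec_find_best_base num out) := by unfold Spec_find_best_base; infer_instance

-- ===== CLAIM (what is proved, stated in full; the proofs are below) =====
def Claim_equal_find_best_base : Prop := ∀ (num : Int), Dom_find_best_base num → Spec_find_best_base num (find_best_base num)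

-- ===== LEMMAS AND PROOFS =====

theorem loopA_eq_goB (base n : Int) (acc : List Char) :
    convertLoopA base n acc = acc ++ (convGoB base n).reverse := by
  induction n, acc using convertLoopA.induct base with
  | case1 n acc h ih =>
      rw [convertLoopA, convGoB]
      simp only [h, show pvDigitsB = pvDigits from rfl]
      rw [ih]
      simp
  | case2 n acc h =>
      rw [convertLoopA, convGoB]
      simp [h]

theorem convEq (num base : Int) (hb : 2 ≤ base) : convertA num base = convertB num base := by
  unfold convertA convertB
  by_cases h : num ≤ 0
  · have hl : convertLoopA base num [] = [] := by
      rw [convertLoopA]; simp only [show ¬(2 ≤ base ∧ 0 < num) by omega, dite_false]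
    simp [hl, h]
  · have hg : convGoB base num ≠ [] := by
      rw [convGoB]; simp [show (2 ≤ base ∧ 0 < num) from ⟨hb, by omega⟩]
    rw [loopA_eq_goB]
    simp [hg, h]

theorem foldl_min_le_init (l : List Int) : ∀ a : Int, l.foldl min a ≤ a := by
  induction l with
  | nil => intro a; simp
  | cons x t ih =>
      intro a
      simp only [List.foldl_cons]
      exact le_trans (ih (min a x)) (min_le_left a x)

theorem sel (c : Int → Int) (r : Int → String) :
    ∀ (bs : List Int) (b0 : Int), (∀ x ∈ bs, b0 < x) → bs.Pairwise (· < ·) →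
    ∃ bstar,
      bs.foldl (fun st b =>
          if c b < st.2.2 then (b, r b, c b)
          else if c b = st.2.2 ∧ b < st.1 then (b, r b, st.2.2) else st) (b0, r b0, c b0)
        = (bstar, r bstar, (bs.map c).foldl min (c b0))
      ∧ (b0 :: bs).find? (fun b => c b == (bs.map c).foldl min (c b0)) = some bstar := by
  intro bs
  induction bs with
  | nil =>
      intro b0 _ _
      exact ⟨b0, by simp, by simp [List.find?]⟩
  | cons b t ih =>
      intro b0 h0 hp
      have hb0b : b0 < b := h0 b (List.mem_cons_self ..)
      set b1 : Int := if c b < c b0 then b else b0 with hb1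
      have hcb1 : c b1 = min (c b0) (c b) := by
        by_cases hc : c b < c b0 <;> simp [hb1, hc] <;> omega
      have h1 : ∀ x ∈ t, b1 < x := by
        intro x hx
        have h2 := h0 x (List.mem_cons_of_mem _ hx)
        have h3 : b < x := (List.pairwise_cons.mp hp).1 x hx
        by_cases hc : c b < c b0 <;> simp [hb1, hc] <;> omega
      obtain ⟨bstar, hfold, hfind⟩ := ih b1 h1 (List.pairwise_cons.mp hp).2
      have hM : ((b :: t).map c).foldl min (c b0) = (t.map c).foldl min (c b1) := by
        simp only [List.map_cons, List.foldl_cons, ← hcb1]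
      refine ⟨bstar, ?_, ?_⟩
      · rw [List.foldl_cons]
        have hstep : (if c b < ((b0, r b0, c b0) : Int × String × Int).2.2 then (b, r b, c b)
            else if c b = ((b0, r b0, c b0) : Int × String × Int).2.2 ∧
                b < ((b0, r b0, c b0) : Int × String × Int).1 then
              (b, r b, ((b0, r b0, c b0) : Int × String × Int).2.2)
            else ((b0, r b0, c b0) : Int × String × Int)) = (b1, r b1, c b1) := by
          by_cases hc : c b < c b0
          · simp [hb1, hc]
          · simp [hb1, hc, show ¬ (c b = c b0 ∧ b < b0) by omega]
        rw [hstep, hfold, hM]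
      · rw [hM]
        set M := (t.map c).foldl min (c b1) with hMdef
        have hMle1 : M ≤ c b1 := foldl_min_le_init _ _
        have hMle0 : M ≤ c b0 := le_trans hMle1 (by rw [hcb1]; exact min_le_left _ _)
        have hMleb : M ≤ c b := le_trans hMle1 (by rw [hcb1]; exact min_le_right _ _)
        by_cases hc0 : c b0 = M
        · have hnc : ¬ c b < c b0 := by intro hlt; omega
          have hb1e : b1 = b0 := by simp [hb1, hnc]
          rw [List.find?_cons_of_pos (by simp [hc0])]
          rw [hb1e] at hfind
          rw [List.find?_cons_of_pos (by simp [hc0])] at hfind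
          exact hfind
        · rw [List.find?_cons_of_neg (by simp [hc0])]
          by_cases hc : c b < c b0
          · have hb1e : b1 = b := by simp [hb1, hc]
            rw [hb1e] at hfind
            exact hfind
          · have hb1e : b1 = b0 := by simp [hb1, hc]
            have hcbne : ¬ c b = M := by
              intro he
              have hle : c b0 ≤ c b := by omega
              omega
            rw [List.find?_cons_of_neg (by simp [hcbne])]
            rw [hb1e] at hfind
            rw [List.find?_cons_of_neg (by simp [hc0])] at hfind
            exact hfind

-- ===== VERDICT (by name: the statement is the Claim_ definition above) =====
set_option maxRecDepth 4000 in
theorem find_best_base_spec : Claim_equal_find_best_base := by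
  intro num _
  unfold Spec_find_best_base
  have hmem : ∀ x ∈ PySem.List.pyRange 3 37 1, (2 : Int) < x := by
    intro x hx
    have := (PySem.List.mem_pyRange_one).mp hx
    omega
  obtain ⟨bstar, hfold, hfind⟩ :=
    sel (fun b => calculate_complexityA (convertA num b)) (fun b => convertA num b)
      (PySem.List.pyRange 3 37 1) 2 hmem (PySem.List.pairwise_lt_pyRange_one ..)
  -- A's value
  have hA : find_best_base num = (bstar, convertA num bstar) := by
    have h0 : find_best_base num =
        (((PySem.List.pyRange 3 37 1).foldl (fun st b =>
            if calculate_complexityA (convertA num b) < st.2.2 then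
              (b, convertA num b, calculate_complexityA (convertA num b))
            else if calculate_complexityA (convertA num b) = st.2.2 ∧ b < st.1 then
              (b, convertA num b, st.2.2)
            else st) (2, convertA num 2, calculate_complexityA (convertA num 2))).1,
         ((PySem.List.pyRange 3 37 1).foldl (fun st b =>
            if calculate_complexityA (convertA num b) < st.2.2 then
              (b, convertA num b, calculate_complexityA (convertA num b))
            else if calculate_complexityA (convertA num b) = st.2.2 ∧ b < st.1 then
              (b, convertA num b, st.2.2)
            else st) (2, convertA num 2, calculate_complexityA (convertA num 2))).2.1) := rfl
    rw [h0, hfold]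
  -- B's value
  have hsplit : PySem.List.pyRange 2 37 1 = 2 :: PySem.List.pyRange 3 37 1 :=
    PySem.List.pyRange_one_cons (by norm_num)
  have hmapA : (PySem.List.pyRange 2 37 1).map (fun b => (b, convertB num b))
      = ((2 : Int) :: PySem.List.pyRange 3 37 1).map (fun b => (b, convertA num b)) := by
    rw [hsplit]
    apply List.map_congr_left
    intro b hb
    rcases List.mem_cons.mp hb with hb2 | hb3
    · rw [hb2, convEq num 2 (by norm_num)]
    · rw [convEq num b (by have := (PySem.List.mem_pyRange_one).mp hb3; omega)]
  have hB : find_best_base_alt num = (bstar, convertA num bstar) := by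
    have h0 : find_best_base_alt num =
        (((PySem.List.pyRange 2 37 1).map (fun b => (b, convertB num b))).find? (fun p =>
            PySem.Str.len p.2 + PySem.Set.len (PySem.Set.ofList p.2.toList) ==
              (PySem.List.min?
                (((PySem.List.pyRange 2 37 1).map (fun b => (b, convertB num b))).map
                  (fun p => PySem.Str.len p.2 + PySem.Set.len (PySem.Set.ofList p.2.toList)))
                (fun x => x)).getD 0)).getD (0, "") := rfl
    rw [h0, hmapA]
    simp only [List.map_map]
    rw [List.find?_map]
    simp only [List.map_cons]
    rw [PySem.List.min?_id_cons]
    simp only [Option.getD_some]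
    have hgoal : ((List.find? (fun b =>
          calculate_complexityA (convertA num b) ==
            ((PySem.List.pyRange 3 37 1).map (fun b => calculate_complexityA (convertA num b))).foldl
              min (calculate_complexityA (convertA num 2)))
          ((2 : Int) :: PySem.List.pyRange 3 37 1)).map
            (fun b => ((b : Int), convertA num b))).getD (0, "") = (bstar, convertA num bstar) := by
      rw [hfind]
      rfl
    exact hgoal
  rw [hA, hB]
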